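-- pv_equiv track=rewrite | github.com/ThomasLincoln/CS50Python | Lecture 5/Exercises/test_plates/plates.py | number_in_middle
-- ===== SOURCE A (Python) =====
-- def number_in_middle(s):
--     found_number = False
--
--     for char in s:
--         if found_number:
--             if char.isalpha():
--                 return True
--         elif char.isdigit():
--             found_number = True
--
--     return False
-- ===== SOURCE B (Python) =====
-- def number_in_middle(s):
--     digits = [i for i, c in enumerate(s) if c.isdigit()]
--     letters = [i for i, c in enumerate(s) if c.isalpha()]
--     return bool(digits) and bool(letters) and min(digits) < max(letters)
-- ===== Notes on version B (the rewrite author's own statement) =====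
-- stated objective: alternative
-- what changed: Instead of a flag-carrying scan, B builds the index lists of all digits and of all letters and answers by comparing extrema: the earliest digit index must lie strictly before the latest letter index.
import Mathlib
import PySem

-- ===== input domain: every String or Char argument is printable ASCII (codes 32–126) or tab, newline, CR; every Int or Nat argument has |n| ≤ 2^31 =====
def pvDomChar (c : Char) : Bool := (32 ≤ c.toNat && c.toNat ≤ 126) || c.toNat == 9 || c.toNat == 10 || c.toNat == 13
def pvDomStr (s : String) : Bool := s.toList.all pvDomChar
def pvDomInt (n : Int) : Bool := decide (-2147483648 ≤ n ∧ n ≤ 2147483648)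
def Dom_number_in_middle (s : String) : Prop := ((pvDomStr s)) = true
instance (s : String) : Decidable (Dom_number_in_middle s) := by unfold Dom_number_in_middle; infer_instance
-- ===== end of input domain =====

-- B replaces A's flag-carrying scan by building the digit-index and letter-index lists and comparing extrema (min digit index < max letter index); same value, no speed claim.
-- ===== PORT A =====
def numAGo : List Char → Bool → Bool
  | [], _ => false
  | c :: rest, found =>
    if found then
      if PySem.Chars.isalpha c then true else numAGo rest found
    else if PySem.Chars.isdigit c then numAGo rest true
    else numAGo rest false

def number_in_middle (s : String) : Bool := numAGo s.toList false

-- ===== PORT B =====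
-- [i for i, c in enumerate(s) if p(c)]
def pvIdxs (p : Char → Bool) (l : List Char) : List Int :=
  (PySem.List.enumerate l).filterMap (fun ic => if p ic.2 then some ic.1 else none)

def number_in_middle_alt (s : String) : Bool :=
  let digits := pvIdxs PySem.Chars.isdigit s.toList
  let letters := pvIdxs PySem.Chars.isalpha s.toList
  !digits.isEmpty && (!letters.isEmpty &&
    (match PySem.List.min? digits (fun x => x), PySem.List.max? letters (fun x => x) with
     | some d, some m => decide (d < m)
     | _, _ => false))

-- ===== PRECONDITION & SPEC =====
def Spec_number_in_middle (s : String) (out : Bool) : Prop := out = number_in_middle_alt s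
instance (s : String) (out : Bool) : Decidable (Spec_number_in_middle s out) := by unfold Spec_number_in_middle; infer_instance

-- ===== CLAIM (what is proved, stated in full; the proofs are below) =====
def Claim_equal_number_in_middle : Prop := ∀ (s : String), Dom_number_in_middle s → Spec_number_in_middle s (number_in_middle s)

-- ===== LEMMAS AND PROOFS =====

-- generalized-start version of pvIdxs, for the induction
def pvIdxsS (p : Char → Bool) (l : List Char) (s : Int) : List Int :=
  (PySem.List.enumerate l s).filterMap (fun ic => if p ic.2 then some ic.1 else none)

theorem pvIdxsS_nil (p : Char → Bool) (s : Int) : pvIdxsS p [] s = [] := rfl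

theorem pvIdxsS_cons (p : Char → Bool) (c : Char) (l : List Char) (s : Int) :
    pvIdxsS p (c :: l) s = (if p c then [s] else []) ++ pvIdxsS p l (s + 1) := by
  by_cases h : p c <;> simp [pvIdxsS, PySem.List.enumerate_cons, h]

theorem pvIdxsS_shift (p : Char → Bool) (l : List Char) (s : Int) :
    pvIdxsS p l (s + 1) = (pvIdxsS p l s).map (· + 1) := by
  induction l generalizing s with
  | nil => rfl
  | cons c rest ih =>
    rw [pvIdxsS_cons, pvIdxsS_cons, ih (s + 1), List.map_append]
    by_cases h : p c <;> simp [h]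

theorem pvIdxsS_eq_nil_iff (p : Char → Bool) (l : List Char) (s : Int) :
    pvIdxsS p l s = [] ↔ l.any p = false := by
  induction l generalizing s with
  | nil => simp [pvIdxsS_nil]
  | cons c rest ih =>
    rw [pvIdxsS_cons]
    by_cases h : p c <;> simp [h, ih]

theorem pvIdxsS_nonneg (p : Char → Bool) (l : List Char) (s : Int)
    (hs : 0 ≤ s) : ∀ x ∈ pvIdxsS p l s, 0 ≤ x := by
  induction l generalizing s with
  | nil => simp [pvIdxsS_nil]
  | cons c rest ih =>
    intro x hx
    rw [pvIdxsS_cons] at hx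
    rcases List.mem_append.mp hx with h1 | h2
    · by_cases h : p c <;> simp [h] at h1; omega
    · exact ih (s + 1) (by omega) x h2

theorem foldl_min_map_add (t : List Int) (a : Int) :
    (t.map (· + 1)).foldl min (a + 1) = t.foldl min a + 1 := by
  induction t generalizing a with
  | nil => rfl
  | cons x rest ih =>
    have h : min (a + 1) (x + 1) = min a x + 1 := by omega
    simp only [List.map_cons, List.foldl_cons, h]; exact ih _

theorem foldl_max_map_add (t : List Int) (a : Int) :
    (t.map (· + 1)).foldl max (a + 1) = t.foldl max a + 1 := by
  induction t generalizing a with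
  | nil => rfl
  | cons x rest ih =>
    have h : max (a + 1) (x + 1) = max a x + 1 := by omega
    simp only [List.map_cons, List.foldl_cons, h]; exact ih _

theorem min?_map_add (xs : List Int) :
    PySem.List.min? (xs.map (· + 1)) (fun x => x) =
      (PySem.List.min? xs (fun x => x)).map (· + 1) := by
  cases xs with
  | nil => rfl
  | cons x t =>
    rw [List.map_cons, PySem.List.min?_id_cons, PySem.List.min?_id_cons]
    simp [foldl_min_map_add]

theorem max?_map_add (xs : List Int) :
    PySem.List.max? (xs.map (· + 1)) (fun x => x) =
      (PySem.List.max? xs (fun x => x)).map (· + 1) := by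
  cases xs with
  | nil => rfl
  | cons x t =>
    rw [List.map_cons, PySem.List.max?_id_cons, PySem.List.max?_id_cons]
    simp [foldl_max_map_add]

theorem foldl_min_const (t : List Int) (a : Int) (h : ∀ x ∈ t, a ≤ x) :
    t.foldl min a = a := by
  induction t with
  | nil => rfl
  | cons x rest ih =>
    have hx : a ≤ x := h x (by simp)
    simp only [List.foldl_cons, min_eq_left hx]
    exact ih (fun y hy => h y (by simp [hy]))

theorem min?_cons_zero (xs : List Int) (h : ∀ x ∈ xs, 0 ≤ x) :
    PySem.List.min? ((0 : Int) :: xs) (fun x => x) = some 0 := by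
  rw [PySem.List.min?_id_cons, foldl_min_const xs 0 h]

theorem max?_cons_zero (xs : List Int) (h : ∀ x ∈ xs, 0 ≤ x) :
    PySem.List.max? ((0 : Int) :: xs) (fun x => x) =
      some ((PySem.List.max? xs (fun x => x)).getD 0) := by
  cases xs with
  | nil => rfl
  | cons x t =>
    rw [PySem.List.max?_id_cons, PySem.List.max?_id_cons]
    have hx : (0 : Int) ≤ x := h x (by simp)
    simp [List.foldl_cons, max_eq_right hx]

theorem digit_not_alpha (c : Char) (h : PySem.Chars.isdigit c = true) :
    PySem.Chars.isalpha c = false := by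
  simp [PySem.Chars.isdigit, PySem.Chars.isalpha] at *
  constructor <;>
    simp [PySem.Chars.isupper, PySem.Chars.islower, Char.le_def, UInt32.le_iff_toNat_le] at * <;>
    omega

-- with found = True, A returns whether any remaining char is a letter
theorem numAGo_true (l : List Char) : numAGo l true = l.any PySem.Chars.isalpha := by
  induction l with
  | nil => rfl
  | cons c rest ih => simp [numAGo, ih]

-- B's value, expressed over the generalized index lists at start 0
def pvBv (l : List Char) : Bool :=
  !(pvIdxsS PySem.Chars.isdigit l 0).isEmpty &&
    (!(pvIdxsS PySem.Chars.isalpha l 0).isEmpty &&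
      (match PySem.List.min? (pvIdxsS PySem.Chars.isdigit l 0) (fun x => x),
             PySem.List.max? (pvIdxsS PySem.Chars.isalpha l 0) (fun x => x) with
       | some d, some m => decide (d < m)
       | _, _ => false))

theorem alt_eq_pvBv (s : String) : number_in_middle_alt s = pvBv s.toList := rfl

theorem main_eq (l : List Char) : numAGo l false = pvBv l := by
  induction l with
  | nil => rfl
  | cons c rest ih =>
    have hD := pvIdxsS_nonneg PySem.Chars.isdigit rest 0 le_rfl
    have hL := pvIdxsS_nonneg PySem.Chars.isalpha rest 0 le_rfl
    by_cases hd : PySem.Chars.isdigit c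
    · -- first digit found here: A scans the rest for a letter
      have ha := digit_not_alpha c hd
      rw [show numAGo (c :: rest) false = numAGo rest true by simp [numAGo, hd]]
      rw [numAGo_true]
      unfold pvBv
      rw [pvIdxsS_cons, pvIdxsS_cons]
      simp only [hd, ha, if_pos, if_neg, Bool.false_eq_true, not_false_iff, List.nil_append,
        List.singleton_append]
      rw [show (0 : Int) + 1 = 0 + 1 by rfl, pvIdxsS_shift, pvIdxsS_shift]
      cases hLrest : pvIdxsS PySem.Chars.isalpha rest 0 with
      | nil =>
        have : rest.any PySem.Chars.isalpha = false := (pvIdxsS_eq_nil_iff _ _ _).mp hLrest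
        simp [this]
      | cons x t =>
        have hany : rest.any PySem.Chars.isalpha = true := by
          cases hh : rest.any PySem.Chars.isalpha
          · rw [(pvIdxsS_eq_nil_iff PySem.Chars.isalpha rest 0).mpr hh] at hLrest
            simp at hLrest
          · rfl
        rw [hany]
        have hmin : PySem.List.min? ((0 : Int) :: (pvIdxsS PySem.Chars.isdigit rest 0).map (· + 1))
            (fun x => x) = some 0 := by
          apply min?_cons_zero
          intro y hy
          rcases List.mem_map.mp hy with ⟨z, hz, rfl⟩
          have := hD z hz
          omega
        rw [hmin, List.map_cons, PySem.List.max?_id_cons]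
        have hx : 0 ≤ x := hL x (by rw [hLrest]; simp)
        have hbig : 0 ≤ (t.map (· + 1)).foldl max (x + 1) - 1 := by
          rw [foldl_max_map_add]
          have := (PySem.List.le_foldl_max t x).1
          omega
        simp only [List.isEmpty_cons, Bool.not_false, Bool.true_and]
        have : (0 : Int) < (t.map (· + 1)).foldl max (x + 1) := by omega
        simp [this]
    · -- no digit yet: A moves on
      rw [show numAGo (c :: rest) false = numAGo rest false by simp [numAGo, hd]]
      rw [ih]
      unfold pvBv
      rw [pvIdxsS_cons, pvIdxsS_cons]
      simp only [hd, if_neg, Bool.false_eq_true, not_false_iff, List.nil_append]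
      rw [show (0 : Int) + 1 = 0 + 1 by rfl, pvIdxsS_shift, pvIdxsS_shift]
      by_cases ha : PySem.Chars.isalpha c
      · simp only [ha, if_pos, List.singleton_append]
        cases hDrest : pvIdxsS PySem.Chars.isdigit rest 0 with
        | nil => simp
        | cons d dt =>
          simp only [List.map_cons, List.isEmpty_cons, Bool.not_false, Bool.true_and]
          rw [show ((d + 1) :: dt.map (· + 1)) = ((d :: dt).map (· + 1)) by simp,
            min?_map_add]
          have hmax0 : PySem.List.max? ((0 : Int) :: (pvIdxsS PySem.Chars.isalpha rest 0).map (· + 1))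
              (fun x => x) = some ((PySem.List.max? ((pvIdxsS PySem.Chars.isalpha rest 0).map (· + 1)) (fun x => x)).getD 0) := by
            apply max?_cons_zero
            intro y hy
            rcases List.mem_map.mp hy with ⟨z, hz, rfl⟩
            have := hL z hz
            omega
          rw [hmax0, max?_map_add]
          cases hmin : PySem.List.min? (d :: dt) (fun x => x) with
          | none => exact absurd hmin (by simp [PySem.List.min?_eq_none_iff])
          | some dm =>
            have hdm0 : 0 ≤ dm := by
              have hmem := PySem.List.min?_mem hmin
              have := hD dm (by rw [hDrest]; exact hmem)
              omega
            cases hLrest : pvIdxsS PySem.Chars.isalpha rest 0 with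
            | nil =>
              have hmaxnil : PySem.List.max? ([] : List Int) (fun x => x) = none := rfl
              have hn : ¬ ((dm + 1 : Int) < 0) := by omega
              simp [hmaxnil, hn]
            | cons x t =>
              cases hmaxv : PySem.List.max? (x :: t) (fun x => x) with
              | none => exact absurd hmaxv (by simp [PySem.List.max?_eq_none_iff])
              | some mv =>
                simp only [Option.map_some, Option.getD_some, List.isEmpty_cons,
                  Bool.not_false, Bool.true_and]
                have : (dm + 1 < mv + 1) = (dm < mv) := by
                  apply propext; omega
                simp [this]
      · simp only [ha, Bool.false_eq_true, not_false_iff, if_neg, List.nil_append]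
        rw [min?_map_add, max?_map_add]
        cases pvIdxsS PySem.Chars.isdigit rest 0 with
        | nil => simp
        | cons d dt =>
          cases hLr : pvIdxsS PySem.Chars.isalpha rest 0 with
          | nil => simp
          | cons x t =>
            simp only [List.map_cons, List.isEmpty_cons, Bool.not_false, Bool.true_and]
            cases hmin : PySem.List.min? (d :: dt) (fun x => x) with
            | none => exact absurd hmin (by simp [PySem.List.min?_eq_none_iff])
            | some dm =>
              cases hmax : PySem.List.max? (x :: t) (fun x => x) with
              | none => exact absurd hmax (by simp [PySem.List.max?_eq_none_iff])
              | some mv =>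
                simp only [Option.map_some]
                have : (dm + 1 < mv + 1) = (dm < mv) := by apply propext; omega
                simp [this]

-- ===== VERDICT (by name: the statement is the Claim_ definition above) =====
theorem number_in_middle_spec : Claim_equal_number_in_middle := by
  intro s _
  unfold Spec_number_in_middle number_in_middle
  rw [alt_eq_pvBv]
  exact main_eq s.toList
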